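-- pv_equiv track=rewrite | github.com/knishibe/AdventOfCode | Day 4/helper.py | getBingoSheets
-- ===== SOURCE A (Python) =====
-- def getBingoSheets(lines):
--     bingoSheets = []
--     tempArray = []
--     for i in range(len(lines)):
--         j = 0
--         if lines[i] == "":
--             j += 1
--             bingoSheets.append(tempArray)
--             tempArray = []
--         tempArray.append(lines[i].split(" "))
--
--     bingoSheets.append(tempArray)
--
--     for i in range(len(bingoSheets)):
--         for j in range(len(bingoSheets[i])):
--             try:
--                 while True:
--                     bingoSheets[i][j].remove("")
--             except ValueError:
--                 pass
--
--     for i in range(len(bingoSheets)):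
--         bingoSheets[i] = [line for line in bingoSheets[i] if line]
--
--     return bingoSheets
-- ===== SOURCE B (Python) =====
-- def getBingoSheets(lines):
--     sheets = []
--     current = []
--     for line in lines:
--         if line == "":
--             sheets.append(current)
--             current = []
--         else:
--             tokens = [t for t in line.split(" ") if t != ""]
--             if tokens:
--                 current.append(tokens)
--     sheets.append(current)
--     return sheets
-- ===== Notes on version B (the rewrite author's own statement) =====
-- stated objective: simpler
-- what changed: Single pass that groups on blank lines and keeps only non-empty token rows as it goes, instead of A's three passes (group raw splits, repeatedly .remove("") in-place, then filter empty rows).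
import Mathlib
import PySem

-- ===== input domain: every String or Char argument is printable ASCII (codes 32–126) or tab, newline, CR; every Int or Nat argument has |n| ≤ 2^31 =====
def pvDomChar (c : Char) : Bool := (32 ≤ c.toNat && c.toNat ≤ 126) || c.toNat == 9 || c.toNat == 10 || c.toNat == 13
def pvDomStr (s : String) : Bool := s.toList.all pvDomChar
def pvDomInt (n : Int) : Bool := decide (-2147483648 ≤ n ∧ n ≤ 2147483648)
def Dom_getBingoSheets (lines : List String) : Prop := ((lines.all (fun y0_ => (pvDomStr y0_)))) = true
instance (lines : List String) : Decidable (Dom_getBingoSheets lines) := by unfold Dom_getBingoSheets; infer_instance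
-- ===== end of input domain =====

-- B replaces A's three passes (group raw splits, repeatedly .remove("") in place, filter empty
-- rows) by a single pass that groups on blank lines and only keeps non-empty token rows; simpler.

-- ===== PORT A =====
-- A's `while True: remove("")` loop: remove the first "" until ValueError (remove? = none).
def pvRemoveAll (row : List String) : List String :=
  match h : PySem.List.remove? row "" with
  | none => row
  | some r => pvRemoveAll r
termination_by row.length
decreasing_by
  have hm : "" ∈ row := by
    by_contra hc
    rw [(PySem.List.remove?_eq_none_iff row "").mpr hc] at h
    cases h
  rw [PySem.List.remove?_eq_some_erase row "" hm] at h
  have hr : r = row.erase "" := (Option.some_inj.mp h).symm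
  subst hr
  have h1 := List.length_erase_of_mem hm
  have h2 : 0 < row.length := List.length_pos_of_mem hm
  omega
-- first loop: build bingoSheets/tempArray; ("" line: append tempArray, reset, then append split)
def pvBuildA : List String → List (List (List String)) → List (List String) →
    List (List (List String)) × List (List String)
  | [], sheets, temp => (sheets, temp)
  | l :: ls, sheets, temp =>
    if l = "" then pvBuildA ls (sheets ++ [temp]) ([] ++ [(PySem.Str.split? l " ").getD []])
    else pvBuildA ls sheets (temp ++ [(PySem.Str.split? l " ").getD []])

def getBingoSheets (lines : List String) : List (List (List String)) :=
  let p := pvBuildA lines [] []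
  let sheets := p.1 ++ [p.2]
  let sheets := sheets.map (fun sheet => sheet.map pvRemoveAll)
  sheets.map (fun sheet => sheet.filter (fun row => row ≠ []))

-- ===== PORT B =====
def pvBuildB : List String → List (List (List String)) → List (List String) →
    List (List (List String))
  | [], sheets, cur => sheets ++ [cur]
  | l :: ls, sheets, cur =>
    if l = "" then pvBuildB ls (sheets ++ [cur]) []
    else
      let tokens := ((PySem.Str.split? l " ").getD []).filter (fun t => t ≠ "")
      if tokens = [] then pvBuildB ls sheets cur
      else pvBuildB ls sheets (cur ++ [tokens])

def getBingoSheets_alt (lines : List String) : List (List (List String)) :=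
  pvBuildB lines [] []

-- ===== PRECONDITION & SPEC =====
def Spec_getBingoSheets (lines : List String) (out : List (List (List String))) : Prop := out = getBingoSheets_alt lines
instance (lines : List String) (out : List (List (List String))) : Decidable (Spec_getBingoSheets lines out) := by unfold Spec_getBingoSheets; infer_instance

-- ===== CLAIM (what is proved, stated in full; the proofs are below) =====
def Claim_equal_getBingoSheets : Prop := ∀ (lines : List String), Dom_getBingoSheets lines → Spec_getBingoSheets lines (getBingoSheets lines)

-- ===== LEMMAS AND PROOFS =====
-- cleaning one sheet, in A's filter form
def pvClean (sheet : List (List String)) : List (List String) :=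
  (sheet.map (fun row => row.filter (fun t => t ≠ ""))).filter (fun row => row ≠ [])

theorem filter_erase_ne (row : List String) :
    (row.erase "").filter (fun t => t ≠ "") = row.filter (fun t => t ≠ "") := by
  induction row with
  | nil => simp
  | cons x xs ih =>
    by_cases h : x = ""
    · subst h; simp
    · rw [List.erase_cons_tail (by simp [h])]
      simp only [List.filter_cons]
      rw [ih]

theorem pvRemoveAll_eq (row : List String) :
    pvRemoveAll row = row.filter (fun t => t ≠ "") := by
  unfold pvRemoveAll
  split
  · rename_i h
    have hm : "" ∉ row := (PySem.List.remove?_eq_none_iff row "").mp h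
    symm
    rw [List.filter_eq_self]
    intro a ha
    simp only [ne_eq, decide_not, Bool.not_eq_eq_eq_not, Bool.not_true, decide_eq_false_iff_not]
    rintro rfl; exact hm ha
  · rename_i r h
    have hm : "" ∈ row := by
      by_contra hc
      rw [(PySem.List.remove?_eq_none_iff row "").mpr hc] at h
      cases h
    rw [PySem.List.remove?_eq_some_erase row "" hm] at h
    have hr : r = row.erase "" := (Option.some_inj.mp h).symm
    subst hr
    have hlt : (row.erase "").length < row.length := by
      have h1 := List.length_erase_of_mem hm
      have h2 : 0 < row.length := List.length_pos_of_mem hm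
      omega
    rw [pvRemoveAll_eq (row.erase "")]
    exact filter_erase_ne row
termination_by row.length

theorem pvClean_append (sheet : List (List String)) (row : List String) :
    pvClean (sheet ++ [row]) =
      pvClean sheet ++
        (if row.filter (fun t => t ≠ "") = [] then [] else [row.filter (fun t => t ≠ "")]) := by
  simp only [pvClean, List.map_append, List.filter_append, List.map_cons, List.map_nil]
  split <;> simp_all

theorem pvBuildA_blank (ls : List String) (sheets : List (List (List String)))
    (temp : List (List String)) :
    pvBuildA ("" :: ls) sheets temp =
      pvBuildA ls (sheets ++ [temp]) ([] ++ [(PySem.Str.split? "" " ").getD []]) := by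
  simp [pvBuildA]

theorem pvBuildB_cons (l : String) (ls : List String) (sheets : List (List (List String)))
    (cur : List (List String)) (h : l ≠ "") :
    pvBuildB (l :: ls) sheets cur =
      if ((PySem.Str.split? l " ").getD []).filter (fun t => t ≠ "") = []
      then pvBuildB ls sheets cur
      else pvBuildB ls sheets (cur ++ [((PySem.Str.split? l " ").getD []).filter (fun t => t ≠ "")]) := by
  rw [pvBuildB]
  rw [if_neg h]

theorem pvBuildB_blank (ls : List String) (sheets : List (List (List String)))
    (cur : List (List String)) :
    pvBuildB ("" :: ls) sheets cur = pvBuildB ls (sheets ++ [cur]) [] := by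
  simp [pvBuildB]

theorem pvBuild_eq (ls : List String) (sheets : List (List (List String)))
    (temp : List (List String)) :
    ((pvBuildA ls sheets temp).1 ++ [(pvBuildA ls sheets temp).2]).map pvClean =
      pvBuildB ls (sheets.map pvClean) (pvClean temp) := by
  induction ls generalizing sheets temp with
  | nil => simp [pvBuildA, pvBuildB]
  | cons l ls ih =>
    by_cases h : l = ""
    · subst h
      rw [pvBuildA_blank, pvBuildB_blank, ih]
      have h1 : pvClean ([] ++ [(PySem.Str.split? "" " ").getD []]) = pvClean [] := by decide
      rw [h1]
      simp [pvClean]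
    · have hA : pvBuildA (l :: ls) sheets temp =
          pvBuildA ls sheets (temp ++ [(PySem.Str.split? l " ").getD []]) := by
        simp [pvBuildA, h]
      rw [hA, ih, pvClean_append, pvBuildB_cons l ls _ _ h]
      by_cases ht : ((PySem.Str.split? l " ").getD []).filter (fun t => t ≠ "") = []
      · rw [if_pos ht, if_pos ht]
        simp
      · rw [if_neg ht, if_neg ht]

theorem pvClean_map (sheets : List (List (List String))) :
    (sheets.map (fun sheet => sheet.map pvRemoveAll)).map
        (fun sheet => sheet.filter (fun row => row ≠ [])) =
      sheets.map pvClean := by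
  have h : pvRemoveAll = fun row => row.filter (fun t => t ≠ "") := funext pvRemoveAll_eq
  simp [pvClean, h]

-- ===== VERDICT (by name: the statement is the Claim_ definition above) =====
theorem getBingoSheets_spec : Claim_equal_getBingoSheets := by
  intro lines _
  show getBingoSheets lines = getBingoSheets_alt lines
  unfold getBingoSheets getBingoSheets_alt
  rw [pvClean_map, pvBuild_eq]
  rfl
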